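-- pv_equiv track=rewrite | github.com/yancleiton7/Multilens | multilens/ext/db/models.py | encriptar_telefone
-- ===== SOURCE A (Python) =====
-- def encriptar_telefone(telefone):
--         telefone_encriptado = ""
--         for indice, valor in enumerate(telefone):
--             if indice<2 or indice>6:
--                 telefone_encriptado = telefone_encriptado+valor
--             else:
--                 telefone_encriptado = telefone_encriptado+"*"
--         return telefone_encriptado
-- ===== SOURCE B (Python) =====
-- def encriptar_telefone(telefone):
--     return telefone[:2] + "*" * len(telefone[2:7]) + telefone[7:]
-- ===== Notes on version B (the rewrite author's own statement) =====
-- stated objective: simpler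
-- what changed: Replaced the per-character enumerate loop with a closed-form slice expression: keep the first two characters, emit one mask character per character in positions 2..6, keep the tail from position 7.
import Mathlib
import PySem

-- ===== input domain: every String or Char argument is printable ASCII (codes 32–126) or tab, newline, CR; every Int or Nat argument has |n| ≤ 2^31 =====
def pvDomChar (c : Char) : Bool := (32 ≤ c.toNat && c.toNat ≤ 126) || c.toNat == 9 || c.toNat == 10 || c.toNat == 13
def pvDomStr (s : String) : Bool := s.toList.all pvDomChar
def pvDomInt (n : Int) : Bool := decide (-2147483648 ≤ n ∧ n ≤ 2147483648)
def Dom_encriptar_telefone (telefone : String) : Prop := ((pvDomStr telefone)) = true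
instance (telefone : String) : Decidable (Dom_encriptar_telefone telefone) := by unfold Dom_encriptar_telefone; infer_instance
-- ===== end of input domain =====

-- B replaces A's per-character enumerate loop by a closed-form slice expression (simpler).

-- ===== PORT A =====
-- loop: for indice, valor in enumerate(telefone): append valor or "*" to the accumulator
def encriptar_telefone (telefone : String) : String :=
  String.ofList ((PySem.List.enumerate telefone.toList 0).foldl
    (fun acc (p : Int × Char) =>
      if p.1 < 2 ∨ p.1 > 6 then acc ++ [p.2] else acc ++ ['*'])
    [])

-- ===== PORT B =====
-- telefone[:2] + "*" * len(telefone[2:7]) + telefone[7:]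
def encriptar_telefone_alt (telefone : String) : String :=
  String.ofList (PySem.List.slice telefone.toList none (some 2)
    ++ List.replicate (PySem.List.slice telefone.toList (some 2) (some 7)).length '*'
    ++ PySem.List.slice telefone.toList (some 7) none)

-- ===== PRECONDITION & SPEC =====
def Spec_encriptar_telefone (telefone : String) (out : String) : Prop := out = encriptar_telefone_alt telefone
instance (telefone : String) (out : String) : Decidable (Spec_encriptar_telefone telefone out) := by unfold Spec_encriptar_telefone; infer_instance

-- ===== CLAIM (what is proved, stated in full; the proofs are below) =====
def Claim_equal_encriptar_telefone : Prop := ∀ (telefone : String), Dom_encriptar_telefone telefone → Spec_encriptar_telefone telefone (encriptar_telefone telefone)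

-- ===== LEMMAS AND PROOFS =====

-- the masked list A's loop builds, as a structural recursion with the running index
def pvMask (s : Int) : List Char → List Char
  | [] => []
  | c :: cs => (if s < 2 ∨ s > 6 then c else '*') :: pvMask (s + 1) cs

lemma pvFoldl_eq_mask (l : List Char) (s : Int) (acc : List Char) :
    (PySem.List.enumerate l s).foldl
      (fun acc (p : Int × Char) =>
        if p.1 < 2 ∨ p.1 > 6 then acc ++ [p.2] else acc ++ ['*']) acc
    = acc ++ pvMask s l := by
  induction l generalizing s acc with
  | nil => simp [PySem.List.enumerate_nil, pvMask]
  | cons c cs ih =>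
      rw [PySem.List.enumerate_cons, List.foldl_cons, ih]
      simp only [pvMask]
      split_ifs with h <;> simp

lemma pvMask_big (l : List Char) (s : Int) (hs : 7 ≤ s) : pvMask s l = l := by
  induction l generalizing s with
  | nil => rfl
  | cons c cs ih =>
      have h : s < 2 ∨ s > 6 := by omega
      simp only [pvMask]
      rw [if_pos h, ih (s + 1) (by omega)]

lemma pvMask_zero (l : List Char) :
    pvMask 0 l = l.take 2 ++ List.replicate ((l.drop 2).take 5).length '*' ++ l.drop 7 := by
  rcases l with _ | ⟨a, _ | ⟨b, _ | ⟨c, _ | ⟨d, _ | ⟨e, _ | ⟨f, _ | ⟨g, rest⟩⟩⟩⟩⟩⟩⟩ <;>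
    simp [pvMask, pvMask_big _ 7 (by omega), List.replicate]

-- ===== VERDICT (by name: the statement is the Claim_ definition above) =====
theorem encriptar_telefone_spec : Claim_equal_encriptar_telefone := by
  intro t _
  unfold Spec_encriptar_telefone encriptar_telefone encriptar_telefone_alt
  rw [pvFoldl_eq_mask, List.nil_append, pvMask_zero]
  have h2 : PySem.List.slice t.toList none (some 2) = t.toList.take 2 :=
    PySem.List.slice_to_natCast t.toList 2
  have h27 : PySem.List.slice t.toList (some 2) (some 7) = (t.toList.drop 2).take 5 :=
    PySem.List.slice_natCast t.toList 2 7
  have h7 : PySem.List.slice t.toList (some 7) none = t.toList.drop 7 :=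
    PySem.List.slice_from_natCast t.toList 7
  rw [h2, h27, h7]
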